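-- pv_equiv track=rewrite | github.com/dev-cavmit/discordpy-bot-hub | modules/commands/superscript.py | func
-- ===== SOURCE A (Python) =====
-- def func(args, bot_prefix=None):
--     alph_def = """abcdefjhigklmnopqrstuvwxyzABCDEFJHIGKLMNOPQRSTUVWXYZ1234567890`~!@#$%^&*()-_=+[{]}\|;:'",<.>/?"""
--     alph_superscript = """ᵃᵇᶜᵈᵉᶠʲʰᶦᵍᵏˡᵐⁿᵒᵖᵠʳˢᵗᵘᵛʷˣʸᶻᴬᴮᶜᴰᴱᶠᴶᴴᴵᴳᴷᴸᴹᴺᴼᴾᵠᴿˢᵀᵁⱽᵂˣʸᶻ¹²³⁴⁵⁶⁷⁸⁹⁰`~ᵎ@#$%^&*⁽⁾⁻_⁼⁺[{]}\|;:'",<.>/ˀ"""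
--     out = ""
--
--     for ch in args:
--         if ch in alph_def:
--             out += alph_superscript[alph_def.index(ch)]
--         else:
--             out += ch
--
--     return out
-- ===== SOURCE B (Python) =====
-- def func(args, bot_prefix=None):
--     alph_def = """abcdefjhigklmnopqrstuvwxyzABCDEFJHIGKLMNOPQRSTUVWXYZ1234567890`~!@#$%^&*()-_=+[{]}\|;:'",<.>/?"""
--     alph_superscript = """ᵃᵇᶜᵈᵉᶠʲʰᶦᵍᵏˡᵐⁿᵒᵖᵠʳˢᵗᵘᵛʷˣʸᶻᴬᴮᶜᴰᴱᶠᴶᴴᴵᴳᴷᴸᴹᴺᴼᴾᵠᴿˢᵀᵁⱽᵂˣʸᶻ¹²³⁴⁵⁶⁷⁸⁹⁰`~ᵎ@#$%^&*⁽⁾⁻_⁼⁺[{]}\|;:'",<.>/ˀ"""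
--     # Traverse the ALPHABET, not the input: one whole-string replace pass per
--     # alphabet character.  Safe because alph_def has no duplicates and every
--     # ASCII char occurring in alph_superscript maps to itself, so no pass can
--     # disturb the output of an earlier one.
--     for d, s in zip(alph_def, alph_superscript):
--         args = args.replace(d, s)
--     return args
-- ===== Notes on version B (the rewrite author's own statement) =====
-- stated objective: faster
-- what changed: B inverts the traversal: instead of A's per-input-character loop that rescans the alphabet (membership test plus .index) for each character, B loops over the 95 zipped alphabet pairs and performs one whole-string replace pass per pair, correct because the alphabet has no duplicate characters and every ASCII character appearing among the superscripts maps to itself, so later passes never disturb earlier output.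
import Mathlib
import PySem

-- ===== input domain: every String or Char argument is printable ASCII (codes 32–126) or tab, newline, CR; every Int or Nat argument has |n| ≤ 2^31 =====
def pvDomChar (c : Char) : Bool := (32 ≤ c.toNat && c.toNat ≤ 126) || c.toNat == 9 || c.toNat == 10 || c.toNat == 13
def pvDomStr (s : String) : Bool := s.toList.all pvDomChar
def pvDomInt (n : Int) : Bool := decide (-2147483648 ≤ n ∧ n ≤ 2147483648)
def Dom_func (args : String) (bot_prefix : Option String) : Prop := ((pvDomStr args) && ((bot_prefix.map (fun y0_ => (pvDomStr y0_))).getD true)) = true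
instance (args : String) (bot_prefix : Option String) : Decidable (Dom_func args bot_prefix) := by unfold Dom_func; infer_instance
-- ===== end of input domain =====

-- B traverses the ALPHABET instead of the input: one whole-string replace pass per
-- alphabet character (objective: alternative; correct because the alphabet has no
-- duplicates and no pass can disturb the output of an earlier one).

-- shared string constants (literals in both Pythons)
def alphDef : List Char := "abcdefjhigklmnopqrstuvwxyzABCDEFJHIGKLMNOPQRSTUVWXYZ1234567890`~!@#$%^&*()-_=+[{]}\\|;:'\",<.>/?".toList
def alphSup : List Char := "ᵃᵇᶜᵈᵉᶠʲʰᶦᵍᵏˡᵐⁿᵒᵖᵠʳˢᵗᵘᵛʷˣʸᶻᴬᴮᶜᴰᴱᶠᴶᴴᴵᴳᴷᴸᴹᴺᴼᴾᵠᴿˢᵀᵁⱽᵂˣʸᶻ¹²³⁴⁵⁶⁷⁸⁹⁰`~ᵎ@#$%^&*⁽⁾⁻_⁼⁺[{]}\\|;:'\",<.>/ˀ".toList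

-- ===== PORT A =====
-- 'ch in alph_def' followed by 'alph_def.index(ch)' is ported as one match on
-- PySem.List.index? alphDef ch: for a single character, substring membership/index in the
-- alphabet string coincide exactly with list membership/first index, and the guarded
-- alph_superscript[i] is in range (the alphabets have equal length), so List.getD is exact.
def func (args : String) (bot_prefix : Option String) : String :=
  String.ofList
    (args.toList.foldl
      (fun out ch =>
        match PySem.List.index? alphDef ch with
        | some i => out ++ [alphSup.getD i ch]
        | none => out ++ [ch])
      [])

-- ===== PORT B =====
-- Source B's 'for d, s in zip(...): args = args.replace(d, s)' — a fold of
-- whole-string replaces over the zipped alphabets.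
def func_alt (args : String) (bot_prefix : Option String) : String :=
  (alphDef.zip alphSup).foldl
    (fun s p => PySem.Str.replace s (String.ofList [p.1]) (String.ofList [p.2])) args

-- ===== PRECONDITION & SPEC =====
def Spec_func (args : String) (bot_prefix : Option String) (out : String) : Prop := out = func_alt args bot_prefix
instance (args : String) (bot_prefix : Option String) (out : String) : Decidable (Spec_func args bot_prefix out) := by unfold Spec_func; infer_instance

-- ===== CLAIM =====
def Claim_equal_func : Prop := ∀ (args : String) (bot_prefix : Option String), Dom_func args bot_prefix → Spec_func args bot_prefix (func args bot_prefix)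

-- ===== LEMMAS AND PROOFS =====

-- single-character replace is a per-character substitution map
theorem replace_go_single (d n : Char) : ∀ (fuel : Nat) (l acc : List Char), l.length ≤ fuel →
    PySem.Chars.replace.go [d] [n] fuel l acc =
      acc.reverse ++ l.map (fun c => if c = d then n else c) := by
  intro fuel
  induction fuel with
  | zero =>
    intro l acc h
    have : l = [] := List.eq_nil_of_length_eq_zero (Nat.le_zero.mp h)
    subst this; simp [PySem.Chars.replace.go]
  | succ fuel ih =>
    intro l acc h
    cases l with
    | nil => simp [PySem.Chars.replace.go]
    | cons c t =>
      rw [PySem.Chars.replace.go]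
      by_cases hc : c = d
      · subst hc
        have hpre : List.isPrefixOf [c] (c :: t) = true := by simp [List.isPrefixOf]
        simp only [hpre, if_true]
        rw [show List.drop [c].length (c :: t) = t from rfl,
          ih t _ (by simpa using Nat.le_of_succ_le_succ h)]
        simp
      · have hpre : List.isPrefixOf [d] (c :: t) = false := by
          simp [List.isPrefixOf, Ne.symm hc]
        simp only [hpre, Bool.false_eq_true, if_false]
        rw [ih t _ (Nat.le_of_succ_le_succ h)]
        simp [hc]

theorem replace_single (l : List Char) (d n : Char) :
    PySem.Chars.replace l [d] [n] = l.map (fun c => if c = d then n else c) := by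
  rw [PySem.Chars.replace]
  simp only [List.isEmpty_cons, Bool.false_eq_true, if_false]
  simpa using replace_go_single d n l.length l [] le_rfl

-- pushing .toList through B's fold of replaces turns it into a fold of maps
theorem foldl_replace_toList (ps : List (Char × Char)) : ∀ (s : String),
    ((ps.foldl (fun s p => PySem.Str.replace s (String.ofList [p.1]) (String.ofList [p.2])) s)).toList =
      ps.foldl (fun l p => l.map (fun c => if c = p.1 then p.2 else c)) s.toList := by
  induction ps with
  | nil => intro s; rfl
  | cons p ps ih =>
    intro s
    simp only [List.foldl_cons]
    rw [ih]
    congr 1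
    rw [PySem.Str.toList_replace]
    simpa [String.toList_ofList] using replace_single s.toList p.1 p.2

-- a fold of maps over a list of substitutions = one map of the folded substitution
theorem foldl_map_eq_map_foldl (ps : List (Char × Char)) : ∀ (l : List Char),
    ps.foldl (fun l p => l.map (fun c => if c = p.1 then p.2 else c)) l =
      l.map (fun c => ps.foldl (fun c p => if c = p.1 then p.2 else c) c) := by
  induction ps with
  | nil => intro l; simp
  | cons p ps ih =>
    intro l
    simp only [List.foldl_cons]
    rw [ih, List.map_map]
    rfl

-- a character not among the keys is fixed by the substitution fold
theorem foldl_subst_not_mem (ks vs : List Char) (c : Char) (h : c ∉ ks) :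
    (ks.zip vs).foldl (fun c p => if c = p.1 then p.2 else c) c = c := by
  induction ks generalizing vs with
  | nil => simp
  | cons k ks ih =>
    cases vs with
    | nil => simp
    | cons v vs =>
      simp only [List.zip_cons_cons, List.foldl_cons]
      have hck : c ≠ k := fun hh => h (hh ▸ List.mem_cons_self)
      rw [if_neg hck]
      exact ih vs (fun hh => h (List.mem_cons_of_mem _ hh))

-- folding the substitutions over one character = A's first-index lookup, provided the
-- keys are distinct and every value is its own key or no key at all
theorem foldl_subst_eq_lookup (ks vs : List Char) (c : Char)
    (hn : ks.Nodup) (hl : vs.length = ks.length)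
    (hp : ∀ p ∈ ks.zip vs, p.2 = p.1 ∨ p.2 ∉ ks) :
    (ks.zip vs).foldl (fun c p => if c = p.1 then p.2 else c) c =
      match PySem.List.index? ks c with
      | some i => vs.getD i c
      | none => c := by
  induction ks generalizing vs c with
  | nil => cases vs <;> simp_all [PySem.List.index?]
  | cons k ks ih =>
    cases vs with
    | nil => simp at hl
    | cons v vs =>
      simp only [List.zip_cons_cons, List.foldl_cons]
      have hkk : k ∉ ks := (List.nodup_cons.mp hn).1
      by_cases hc : c = k
      · subst hc
        rw [if_pos rfl, PySem.List.index?_cons_self]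
        have hv : v = c ∨ v ∉ c :: ks := hp (c, v) (by simp)
        have hvks : v ∉ ks := by
          rcases hv with hv | hv
          · subst hv; exact hkk
          · exact fun hh => hv (List.mem_cons_of_mem _ hh)
        simpa using foldl_subst_not_mem ks vs v hvks
      · rw [if_neg hc]
        rw [ih vs c (List.nodup_cons.mp hn).2 (by simpa using hl)
          (fun p hpmem => by
            rcases hp p (List.mem_cons_of_mem _ hpmem) with h | h
            · exact Or.inl h
            · exact Or.inr fun hh => h (List.mem_cons_of_mem _ hh))]
        rw [PySem.List.index?_cons_of_ne ks (fun h => hc h.symm)]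
        cases h : PySem.List.index? ks c with
        | some i => simp
        | none => simp

set_option maxRecDepth 100000 in
theorem alphDef_nodup : alphDef.Nodup := by decide

set_option maxRecDepth 100000 in
theorem alph_len : alphSup.length = alphDef.length := by decide

set_option maxRecDepth 1000000 in
theorem alph_values_safe : ∀ p ∈ alphDef.zip alphSup, p.2 = p.1 ∨ p.2 ∉ alphDef := by decide

-- ===== VERDICT =====
theorem func_spec : Claim_equal_func := by
  intro args bot_prefix _
  unfold Spec_func func func_alt
  apply String.toList_injective
  rw [String.toList_ofList, foldl_replace_toList, foldl_map_eq_map_foldl]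
  have hbody : (fun (out : List Char) (ch : Char) =>
      match PySem.List.index? alphDef ch with
      | some i => out ++ [alphSup.getD i ch]
      | none => out ++ [ch]) =
      fun out ch => out ++ [match PySem.List.index? alphDef ch with
        | some i => alphSup.getD i ch
        | none => ch] := by
    funext out ch
    cases PySem.List.index? alphDef ch <;> rfl
  rw [hbody, PySem.List.foldl_append_singleton_eq_map]
  exact List.map_congr_left (fun c _ =>
    (foldl_subst_eq_lookup alphDef alphSup c alphDef_nodup alph_len alph_values_safe).symm)
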